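-- pv_equiv track=rewrite | github.com/rachitbangwal/Smart-CP-Generator | src/preprocessors/template_preprocessor.py | _estimate_section_importance
-- ===== SOURCE A (Python) =====
-- def _estimate_section_importance(section_title: str) -> int:
--     """Estimate the importance of a section (1-10)"""
--     title_lower = section_title.lower()
--
--     # Critical sections
--     if any(word in title_lower for word in ['vessel', 'cargo', 'freight', 'charter']):
--         return 9
--
--     # Important sections
--     if any(word in title_lower for word in ['port', 'delivery', 'payment', 'terms']):
--         return 7
--
--     # Standard sections
--     if any(word in title_lower for word in ['notice', 'clause', 'condition']):
--         return 5
--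
--     return 3
-- ===== SOURCE B (Python) =====
-- _KEYWORD_SCORES = {
--     'vessel': 9, 'cargo': 9, 'freight': 9, 'charter': 9,
--     'port': 7, 'delivery': 7, 'payment': 7, 'terms': 7,
--     'notice': 5, 'clause': 5, 'condition': 5,
-- }
--
-- def _estimate_section_importance(section_title: str) -> int:
--     """Single pass over a keyword->score table, keeping the best matched score (default 3)."""
--     title_lower = section_title.lower()
--     best = 3
--     for word, score in _KEYWORD_SCORES.items():
--         if word in title_lower and score > best:
--             best = score
--     return best
-- ===== Notes on version B (the rewrite author's own statement) =====
-- stated objective: simpler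
-- what changed: Replaces the three-tier early-return cascade with a single keyword->score table scanned once, returning the maximum matched score (default 3); correct because the cascade's scores are strictly descending.
import Mathlib
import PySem

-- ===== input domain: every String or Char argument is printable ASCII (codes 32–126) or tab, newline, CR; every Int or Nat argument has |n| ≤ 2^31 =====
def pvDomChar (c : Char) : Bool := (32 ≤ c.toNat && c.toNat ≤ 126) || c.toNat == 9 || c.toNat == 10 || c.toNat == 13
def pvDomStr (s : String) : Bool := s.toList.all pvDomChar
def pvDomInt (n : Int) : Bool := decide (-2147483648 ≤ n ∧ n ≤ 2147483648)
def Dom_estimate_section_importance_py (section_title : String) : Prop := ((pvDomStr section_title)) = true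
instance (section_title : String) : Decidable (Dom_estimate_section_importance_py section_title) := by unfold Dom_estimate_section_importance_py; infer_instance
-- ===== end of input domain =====

-- B replaces A's three-tier early-return cascade by one keyword→score table scanned once,
-- returning the maximum matched score (default 3); simpler, same cost.

-- ===== PORT A =====
def estimate_section_importance_py (section_title : String) : Int :=
  let title_lower := PySem.Str.lower section_title
  if ["vessel", "cargo", "freight", "charter"].any (fun w => PySem.Str.isIn w title_lower) then 9
  else if ["port", "delivery", "payment", "terms"].any (fun w => PySem.Str.isIn w title_lower) then 7
  else if ["notice", "clause", "condition"].any (fun w => PySem.Str.isIn w title_lower) then 5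
  else 3

-- ===== PORT B =====
def kwScores : List (String × Int) :=
  [("vessel", 9), ("cargo", 9), ("freight", 9), ("charter", 9),
   ("port", 7), ("delivery", 7), ("payment", 7), ("terms", 7),
   ("notice", 5), ("clause", 5), ("condition", 5)]

def estimate_section_importance_py_alt (section_title : String) : Int :=
  let title_lower := PySem.Str.lower section_title
  kwScores.foldl
    (fun best p => if PySem.Str.isIn p.1 title_lower && best < p.2 then p.2 else best) 3

-- ===== PRECONDITION & SPEC =====
def Spec_estimate_section_importance_py (section_title : String) (out : Int) : Prop := out = estimate_section_importance_py_alt section_title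
instance (section_title : String) (out : Int) : Decidable (Spec_estimate_section_importance_py section_title out) := by unfold Spec_estimate_section_importance_py; infer_instance

-- ===== CLAIM (what is proved, stated in full; the proofs are below) =====
def Claim_equal_estimate_section_importance_py : Prop := ∀ (section_title : String), Dom_estimate_section_importance_py section_title → Spec_estimate_section_importance_py section_title (estimate_section_importance_py section_title)

-- ===== LEMMAS AND PROOFS =====
def pvStep (b : Bool) (sc best : Int) : Int := if b && best < sc then sc else best

theorem pvKey (b1 b2 b3 b4 b5 b6 b7 b8 b9 b10 b11 : Bool) :
    (if b1 || (b2 || (b3 || (b4 || false))) then (9 : Int)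
     else if b5 || (b6 || (b7 || (b8 || false))) then 7
     else if b9 || (b10 || (b11 || false)) then 5
     else 3)
    = pvStep b11 5 (pvStep b10 5 (pvStep b9 5 (pvStep b8 7 (pvStep b7 7 (pvStep b6 7
        (pvStep b5 7 (pvStep b4 9 (pvStep b3 9 (pvStep b2 9 (pvStep b1 9 3)))))))))) := by
  cases b1 <;> cases b2 <;> cases b3 <;> cases b4 <;> cases b5 <;> cases b6 <;>
    cases b7 <;> cases b8 <;> cases b9 <;> cases b10 <;> cases b11 <;> rfl

-- ===== VERDICT (by name: the statement is the Claim_ definition above) =====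
theorem estimate_section_importance_py_spec : Claim_equal_estimate_section_importance_py := by
  intro s _
  unfold Spec_estimate_section_importance_py
  exact pvKey (PySem.Str.isIn "vessel" (PySem.Str.lower s)) (PySem.Str.isIn "cargo" (PySem.Str.lower s))
    (PySem.Str.isIn "freight" (PySem.Str.lower s)) (PySem.Str.isIn "charter" (PySem.Str.lower s))
    (PySem.Str.isIn "port" (PySem.Str.lower s)) (PySem.Str.isIn "delivery" (PySem.Str.lower s))
    (PySem.Str.isIn "payment" (PySem.Str.lower s)) (PySem.Str.isIn "terms" (PySem.Str.lower s))
    (PySem.Str.isIn "notice" (PySem.Str.lower s)) (PySem.Str.isIn "clause" (PySem.Str.lower s))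
    (PySem.Str.isIn "condition" (PySem.Str.lower s))
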